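-- pv_equiv track=rewrite | github.com/S3nna13/Aurelius | src/agent/toolformer_data_gen.py | _candidate_positions
-- ===== SOURCE A (Python) =====
-- def _candidate_positions(text: str) -> list[int]:
--     """Return character positions (end-of-word) for candidate insertions."""
--     positions: list[int] = []
--     i = 0
--     while i < len(text):
--         # Advance past non-space chars to find end-of-word.
--         while i < len(text) and not text[i].isspace():
--             i += 1
--         if i > 0:
--             positions.append(i)
--         # Advance past spaces.
--         while i < len(text) and text[i].isspace():
--             i += 1
--     return positions
-- ===== SOURCE B (Python) =====
-- def _candidate_positions(text: str) -> list[int]: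
--     """Return character positions (end-of-word) for candidate insertions."""
--     n = len(text)
--     return [i + 1 for i in range(n)
--             if not text[i].isspace() and (i + 1 == n or text[i + 1].isspace())]
-- ===== Notes on version B (the rewrite author's own statement) =====
-- stated objective: simpler
-- what changed: Replaced the index pointer with two nested skip-scanning while loops by a single comprehension that tests a local word-end boundary predicate at each character.
import Mathlib
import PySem

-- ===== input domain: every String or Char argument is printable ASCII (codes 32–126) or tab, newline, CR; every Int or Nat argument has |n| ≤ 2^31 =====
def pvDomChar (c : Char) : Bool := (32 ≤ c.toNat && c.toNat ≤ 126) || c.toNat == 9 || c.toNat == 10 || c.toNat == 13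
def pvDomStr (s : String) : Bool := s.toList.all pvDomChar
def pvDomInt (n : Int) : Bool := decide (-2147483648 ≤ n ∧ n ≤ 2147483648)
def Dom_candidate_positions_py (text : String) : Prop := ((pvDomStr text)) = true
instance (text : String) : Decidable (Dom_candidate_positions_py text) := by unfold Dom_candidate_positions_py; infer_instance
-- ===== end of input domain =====

-- B replaces A's pointer with two nested skip-scanning while loops by a single pass
-- testing a local word-end boundary predicate at each character (objective: simpler).

-- ===== PORT A =====
-- text[i].isspace() on the fixed text (getD default is irrelevant: accessed only in range)
def pvSpAt (cs : List Char) (i : Nat) : Bool := PySem.Chars.isspace (cs.getD i ' ')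

-- inner 'while i < len(text) and not text[i].isspace(): i += 1'
def pvSkipNS (cs : List Char) (i : Nat) : Nat :=
  if i < cs.length ∧ pvSpAt cs i = false then pvSkipNS cs (i + 1) else i
termination_by cs.length - i
decreasing_by omega

-- inner 'while i < len(text) and text[i].isspace(): i += 1'
def pvSkipS (cs : List Char) (i : Nat) : Nat :=
  if i < cs.length ∧ pvSpAt cs i = true then pvSkipS cs (i + 1) else i
termination_by cs.length - i
decreasing_by omega

theorem pvSkipNS_ge (cs : List Char) (i : Nat) : i ≤ pvSkipNS cs i := by
  fun_induction pvSkipNS cs i with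
  | case1 i h ih => omega
  | case2 i h => omega

theorem pvSkipS_ge (cs : List Char) (i : Nat) : i ≤ pvSkipS cs i := by
  fun_induction pvSkipS cs i with
  | case1 i h ih => omega
  | case2 i h => omega

theorem pvStep_gt (cs : List Char) (i : Nat) (h : i < cs.length) :
    i < pvSkipS cs (pvSkipNS cs i) := by
  by_cases hsp : pvSpAt cs i = true
  · have h1 : pvSkipNS cs i = i := by
      rw [pvSkipNS]; simp [hsp]
    have h2 : pvSkipS cs i = pvSkipS cs (i + 1) := by
      rw [pvSkipS, if_pos ⟨h, hsp⟩]
    rw [h1, h2]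
    have := pvSkipS_ge cs (i + 1)
    omega
  · have h1 : pvSkipNS cs i = pvSkipNS cs (i + 1) := by
      rw [pvSkipNS]; simp [h, hsp]
    have h2 := pvSkipNS_ge cs (i + 1)
    have h3 := pvSkipS_ge cs (pvSkipNS cs i)
    omega

-- outer while loop of A
def pvLoopA (cs : List Char) (i : Nat) (acc : List Int) : List Int :=
  if h : i < cs.length then
    let j := pvSkipNS cs i
    pvLoopA cs (pvSkipS cs j) (if j > 0 then acc ++ [(j : Int)] else acc)
  else acc
termination_by cs.length - i
decreasing_by have := pvStep_gt cs i h; omega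

def candidate_positions_py (text : String) : List Int :=
  pvLoopA text.toList 0 []

-- ===== PORT B =====
-- word-end boundary test at index i: text[i] not a space and (i+1 == n or text[i+1] a space)
def pvPred (cs : List Char) (i : Nat) : Bool :=
  !pvSpAt cs i &&
    (i + 1 == cs.length || pvSpAt cs (i + 1))

def candidate_positions_py_alt (text : String) : List Int :=
  (List.range text.toList.length).filterMap
    (fun i => if pvPred text.toList i then some ((i : Int) + 1) else none)

-- ===== PRECONDITION & SPEC =====
def Spec_candidate_positions_py (text : String) (out : List Int) : Prop := out = candidate_positions_py_alt text
instance (text : String) (out : List Int) : Decidable (Spec_candidate_positions_py text out) := by unfold Spec_candidate_positions_py; infer_instance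

-- ===== CLAIM (what is proved, stated in full; the proofs are below) =====
def Claim_equal_candidate_positions_py : Prop := ∀ (text : String), Dom_candidate_positions_py text → Spec_candidate_positions_py text (candidate_positions_py text)

-- ===== LEMMAS AND PROOFS =====

-- B's output restricted to indices ≥ i
def pvBf (cs : List Char) (i : Nat) : List Int :=
  (List.range' i (cs.length - i)).filterMap
    (fun k => if pvPred cs k then some ((k : Int) + 1) else none)

theorem pvBf_eq_alt (text : String) :
    candidate_positions_py_alt text = pvBf text.toList 0 := by
  simp [candidate_positions_py_alt, pvBf, List.range_eq_range']

theorem pvBf_end (cs : List Char) (i : Nat) (h : cs.length ≤ i) : pvBf cs i = [] := by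
  simp [pvBf, Nat.sub_eq_zero_of_le h]

theorem pvBf_step (cs : List Char) (i : Nat) (h : i < cs.length) :
    pvBf cs i = (if pvPred cs i then [(i : Int) + 1] else []) ++ pvBf cs (i + 1) := by
  have : cs.length - i = (cs.length - (i + 1)) + 1 := by omega
  rw [pvBf, this, List.range'_succ]
  by_cases hp : pvPred cs i <;> simp [hp, pvBf]

-- skipNS specification
theorem pvSkipNS_spec (cs : List Char) (i : Nat) :
    (∀ k, i ≤ k → k < pvSkipNS cs i → pvSpAt cs k = false) ∧
    (cs.length ≤ pvSkipNS cs i ∨ pvSpAt cs (pvSkipNS cs i) = true) := by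
  fun_induction pvSkipNS cs i with
  | case1 i h ih =>
    refine ⟨fun k hk1 hk2 => ?_, ih.2⟩
    rcases Nat.eq_or_lt_of_le hk1 with rfl | hlt
    · exact h.2
    · exact ih.1 k hlt hk2
  | case2 i h =>
    refine ⟨fun k hk1 hk2 => by omega, ?_⟩
    by_cases hi : i < cs.length
    · right
      rcases Bool.eq_false_or_eq_true (pvSpAt cs i) with ht | hf
      · exact ht
      · exact absurd ⟨hi, hf⟩ h
    · left; omega

theorem pvSkipNS_le (cs : List Char) (i : Nat) (h : i ≤ cs.length) :
    pvSkipNS cs i ≤ cs.length := by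
  fun_induction pvSkipNS cs i with
  | case1 i h2 ih => exact ih h2.1
  | case2 i h2 => exact h

theorem pvSkipNS_gt (cs : List Char) (i : Nat) (h : i < cs.length)
    (hsp : pvSpAt cs i = false) : i < pvSkipNS cs i := by
  rw [pvSkipNS, if_pos ⟨h, hsp⟩]
  have := pvSkipNS_ge cs (i + 1)
  omega

-- skipS specification
theorem pvSkipS_spec (cs : List Char) (i : Nat) :
    (∀ k, i ≤ k → k < pvSkipS cs i → pvSpAt cs k = true) ∧
    (cs.length ≤ pvSkipS cs i ∨ pvSpAt cs (pvSkipS cs i) = false) := by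
  fun_induction pvSkipS cs i with
  | case1 i h ih =>
    refine ⟨fun k hk1 hk2 => ?_, ih.2⟩
    rcases Nat.eq_or_lt_of_le hk1 with rfl | hlt
    · exact h.2
    · exact ih.1 k hlt hk2
  | case2 i h =>
    refine ⟨fun k hk1 hk2 => by omega, ?_⟩
    by_cases hi : i < cs.length
    · right
      rcases Bool.eq_false_or_eq_true (pvSpAt cs i) with ht | hf
      · exact absurd ⟨hi, ht⟩ h
      · exact hf
    · left; omega

theorem pvSkipS_le (cs : List Char) (i : Nat) (h : i ≤ cs.length) :
    pvSkipS cs i ≤ cs.length := by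
  fun_induction pvSkipS cs i with
  | case1 i h2 ih => exact ih h2.1
  | case2 i h2 => exact h

-- a run of spaces contributes nothing to B
theorem pvBf_spaces (cs : List Char) (i j : Nat) (hij : i ≤ j) (hj : j ≤ cs.length)
    (hsp : ∀ k, i ≤ k → k < j → pvSpAt cs k = true) :
    pvBf cs i = pvBf cs j := by
  induction j with
  | zero =>
    have : i = 0 := by omega
    subst this; rfl
  | succ m ih =>
    rcases Nat.eq_or_lt_of_le hij with rfl | hlt
    · rfl
    · have hi : i ≤ m := by omega
      have hstep : pvBf cs m = pvBf cs (m + 1) := by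
        rw [pvBf_step cs m (by omega)]
        have : pvPred cs m = false := by
          simp [pvPred, hsp m hi (by omega)]
        simp [this]
      rw [ih hi (by omega) (fun k h1 h2 => hsp k h1 (by omega)), hstep]

-- a word run [i, j) with a boundary at j contributes exactly j
theorem pvBf_word (cs : List Char) (j : Nat) (hj : j ≤ cs.length)
    (hb : cs.length ≤ j ∨ pvSpAt cs j = true) :
    ∀ d i, j - i ≤ d → i < j →
    (∀ k, i ≤ k → k < j → pvSpAt cs k = false) →
    pvBf cs i = (j : Int) :: pvBf cs j := by
  intro d
  induction d with
  | zero => intro i h1 h2 _; omega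
  | succ m ih =>
    intro i h1 h2 hns
    by_cases hcase : i + 1 = j
    · rw [pvBf_step cs i (by omega)]
      have hpred : pvPred cs i = true := by
        have hi := hns i (le_refl i) h2
        rcases hb with hend | hspj
        · have : i + 1 = cs.length := by omega
          simp [pvPred, hi, this]
        · rw [← hcase] at hspj
          simp [pvPred, hi, hspj]
      rw [← hcase]
      simp [hpred]
    · have hstep : pvBf cs i = pvBf cs (i + 1) := by
        rw [pvBf_step cs i (by omega)]
        have hp : pvPred cs i = false := by
          have hh1 := hns i (le_refl i) h2
          have hh2 := hns (i + 1) (by omega) (by omega)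
          have hne : ¬ (i + 1 = cs.length) := by omega
          simp [pvPred, hh1, hh2, hne]
        simp [hp]
      rw [hstep]
      exact ih (i + 1) (by omega) (by omega) (fun k hk1 hk2 => hns k (by omega) hk2)

-- main loop invariant: entering the outer loop at a "clean" index
theorem pvLoopA_eq (cs : List Char) : ∀ d i acc, cs.length - i ≤ d → i ≤ cs.length →
    (cs.length ≤ i ∨ pvSpAt cs i = false) →
    pvLoopA cs i acc = acc ++ pvBf cs i := by
  intro d
  induction d with
  | zero =>
    intro i acc hd hle _
    have : i = cs.length := by omega
    subst this
    rw [pvLoopA]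
    simp [pvBf_end cs cs.length (le_refl _)]
  | succ m ih =>
    intro i acc hd hle hclean
    by_cases hi : i < cs.length
    · have hns : pvSpAt cs i = false := hclean.resolve_left (by omega)
      set j := pvSkipNS cs i with hj
      have hjgt : i < j := pvSkipNS_gt cs i hi hns
      have hjle : j ≤ cs.length := pvSkipNS_le cs i (by omega)
      have hspec := pvSkipNS_spec cs i
      set k := pvSkipS cs j with hk
      have hkge : j ≤ k := pvSkipS_ge cs j
      have hkle : k ≤ cs.length := pvSkipS_le cs j hjle
      have hsspec := pvSkipS_spec cs j
      have hword : pvBf cs i = (j : Int) :: pvBf cs j :=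
        pvBf_word cs j hjle hspec.2 cs.length i (by omega) hjgt hspec.1
      have hsp : pvBf cs j = pvBf cs k :=
        pvBf_spaces cs j k hkge hkle hsspec.1
      rw [pvLoopA]
      simp only [hi, dif_pos]
      have hjpos : j > 0 := by omega
      rw [if_pos hjpos]
      rw [ih k (acc ++ [(j : Int)]) (by have := pvStep_gt cs i hi; omega) hkle hsspec.2]
      rw [hword, hsp]
      simp
    · have : i = cs.length := by omega
      subst this
      rw [pvLoopA]
      simp [pvBf_end cs cs.length (le_refl _)]

-- ===== VERDICT (by name: the statement is the Claim_ definition above) =====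
theorem candidate_positions_py_spec : Claim_equal_candidate_positions_py := by
  intro text _
  unfold Spec_candidate_positions_py candidate_positions_py
  rw [pvBf_eq_alt]
  set cs := text.toList with hcs
  by_cases h0 : cs.length = 0
  · rw [pvLoopA]
    simp [h0, pvBf_end cs 0 (by omega)]
  · by_cases hsp : pvSpAt cs 0 = false
    · exact pvLoopA_eq cs cs.length 0 [] (by omega) (by omega) (Or.inr hsp)
    · -- leading space: one manual unfold of the outer loop
      have hsp' : pvSpAt cs 0 = true := by
        rcases Bool.eq_false_or_eq_true (pvSpAt cs 0) with h | h
        · exact h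
        · exact absurd h hsp
      have h1 : pvSkipNS cs 0 = 0 := by rw [pvSkipNS]; simp [hsp']
      have hpos : 0 < cs.length := by omega
      rw [pvLoopA]
      simp only [hpos, dif_pos, h1]
      rw [if_neg (by omega)]
      set k := pvSkipS cs 0 with hk
      have hkle : k ≤ cs.length := pvSkipS_le cs 0 (by omega)
      have hsspec := pvSkipS_spec cs 0
      rw [pvLoopA_eq cs cs.length k [] (by omega) hkle hsspec.2]
      rw [pvBf_spaces cs 0 k (by omega) hkle hsspec.1]
      simp
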